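-- pv_equiv track=rewrite | github.com/Eleanoryuyuyu/LeetCode | 剑指offer/38. 字符串的排列.py | Permutation2
-- ===== SOURCE A (Python) =====
-- def Permutation2(ss):
--     if not ss:
--         return []
--     ss = list(ss)
--     res = [""]
--     for w in ss:
--         res += [c + w for c in res]
--     return res
-- ===== SOURCE B (Python) =====
-- def Permutation2(ss):
--     if not ss:
--         return []
--     ss = list(ss)
--     n = len(ss)
--     return ["".join(ss[j] for j in range(n) if mask & (1 << j)) for mask in range(1 << n)]
-- ===== Notes on version B (the rewrite author's own statement) =====
-- stated objective: alternative
-- what changed: Replaces the iterative res += [c+w for c in res] doubling loop with a single pass over bitmasks 0..2^n-1, building each subset string directly from the bits of its mask (LSB = first character).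
import Mathlib
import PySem

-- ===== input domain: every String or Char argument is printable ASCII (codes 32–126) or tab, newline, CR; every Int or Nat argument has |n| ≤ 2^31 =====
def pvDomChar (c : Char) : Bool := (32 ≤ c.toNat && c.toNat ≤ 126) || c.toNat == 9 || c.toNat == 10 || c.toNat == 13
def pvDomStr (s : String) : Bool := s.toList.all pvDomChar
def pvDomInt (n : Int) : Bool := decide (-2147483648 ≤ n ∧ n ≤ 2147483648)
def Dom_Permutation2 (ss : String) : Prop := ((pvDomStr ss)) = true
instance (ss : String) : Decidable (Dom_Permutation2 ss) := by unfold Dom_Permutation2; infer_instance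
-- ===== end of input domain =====

-- B replaces A's repeated doubling of the result list with a single pass over bitmasks
-- 0..2^n-1, building each subset string directly from the bits of its mask (alternative
-- decomposition, same asymptotic cost).

-- ===== PORT A =====
-- A: res = [""]; for w in ss: res += [c + w for c in res].  Strings are carried as List Char
-- and converted with String.mk at the end (exact: both are plain char-sequence concatenation).
def Permutation2 (ss : String) : List String :=
  if ss.toList = [] then []
  else
    ((ss.toList).foldl (fun res w => res ++ res.map (fun c => c ++ [w])) ([[]] : List (List Char))).map String.mk

-- ===== PORT B =====
-- B: for each mask in range(2^n), join ss[j] for the j with bit j set (LSB = first char).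
def Permutation2_alt (ss : String) : List String :=
  let l := ss.toList
  if l = [] then []
  else
    (List.range (2 ^ l.length)).map (fun mask =>
      String.mk ((l.zipIdx.filterMap (fun cj => if mask.testBit cj.2 then some cj.1 else none))))

-- ===== PRECONDITION & SPEC =====
def Spec_Permutation2 (ss : String) (out : List String) : Prop := out = Permutation2_alt ss
instance (ss : String) (out : List String) : Decidable (Spec_Permutation2 ss out) := by unfold Spec_Permutation2; infer_instance

-- ===== CLAIM (what is proved, stated in full; the proofs are below) =====
def Claim_equal_Permutation2 : Prop := ∀ (ss : String), Dom_Permutation2 ss → Spec_Permutation2 ss (Permutation2 ss)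

-- ===== LEMMAS AND PROOFS =====

-- the subset of l selected by the bits of mask (B's per-mask builder)
def pvSubset (l : List Char) (mask : Nat) : List Char :=
  l.zipIdx.filterMap (fun cj => if mask.testBit cj.2 then some cj.1 else none)

theorem pvSubset_append_low (l : List Char) (w : Char) (mask : Nat) (h : mask < 2 ^ l.length) :
    pvSubset (l ++ [w]) mask = pvSubset l mask := by
  unfold pvSubset
  rw [List.zipIdx_append, List.filterMap_append]
  have : mask.testBit l.length = false := Nat.testBit_lt_two_pow h
  simp [List.zipIdx, this]

theorem pvSubset_append_high (l : List Char) (w : Char) (mask : Nat) (h : mask < 2 ^ l.length) :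
    pvSubset (l ++ [w]) (2 ^ l.length + mask) = pvSubset l mask ++ [w] := by
  unfold pvSubset
  rw [List.zipIdx_append, List.filterMap_append]
  have htop : (2 ^ l.length + mask).testBit l.length = true := by
    simp [Nat.testBit_two_pow_add_eq, Nat.testBit_lt_two_pow h]
  have hlow : ∀ j, j < l.length → (2 ^ l.length + mask).testBit j = mask.testBit j :=
    fun j hj => Nat.testBit_two_pow_add_gt hj mask
  simp only [List.zipIdx]
  congr 1
  · apply List.filterMap_congr
    intro cj hcj
    have hj : cj.2 < l.length := by
      have := List.snd_lt_add_of_mem_zipIdx hcj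
      simpa using this
    rw [hlow cj.2 hj]
  · simp [htop]

theorem pvFold_eq (l : List Char) :
    l.foldl (fun res w => res ++ res.map (fun c => c ++ [w])) ([[]] : List (List Char))
      = (List.range (2 ^ l.length)).map (pvSubset l) := by
  induction l using List.reverseRecOn with
  | nil => simp [pvSubset]
  | append_singleton l w ih =>
    rw [List.foldl_append, ih]
    have hlen : (l ++ [w]).length = l.length + 1 := by simp
    rw [hlen, pow_succ, mul_two, List.range_add, List.map_append]
    simp only [List.foldl_cons, List.foldl_nil]
    congr 1
    · apply List.map_congr_left
      intro mask hm
      rw [List.mem_range] at hm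
      exact (pvSubset_append_low l w mask hm).symm
    · rw [List.map_map, List.map_map]
      apply List.map_congr_left
      intro mask hm
      rw [List.mem_range] at hm
      simp only [Function.comp]
      exact (pvSubset_append_high l w mask hm).symm

-- ===== VERDICT (by name: the statement is the Claim_ definition above) =====
theorem Permutation2_spec : Claim_equal_Permutation2 := by
  intro ss _
  unfold Spec_Permutation2 Permutation2 Permutation2_alt
  by_cases h : ss.toList = []
  · simp [h]
  · simp only [h, reduceIte]
    rw [pvFold_eq]
    simp [pvSubset, List.map_map]
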